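-- pv_equiv track=rewrite | github.com/DemitrisM/ThreatLens | modules/static/ioc_extractor.py | _filter_url_fps
-- ===== SOURCE A (Python) =====
-- _FP_URL_SUBSTRINGS = (
--     "tempuri.org",
--     "schemas.microsoft.com",
--     "schemas.xmlsoap.org",
--     "schemas.openxmlformats.org",
--     "schemas.datacontract.org",
--     "www.w3.org",
--     "ns.adobe.com",
--     "purl.org",
--     "ocsp.digicert.com",
--     "crl.digicert.com",
--     "ocsp.verisign.com",
--     "crl.verisign.com",
--     "go.microsoft.com/fwlink",
-- )
--
-- def _filter_url_fps(urls: set[str]) -> set[str]: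
--     """Drop URLs whose host is a known XML/namespace/schema artefact.
--
--     Many .NET binaries embed http://tempuri.org/* and similar URLs as
--     XML namespaces — they are not C2 endpoints and should not inflate
--     the network IOC count.
--     """
--     result: set[str] = set()
--     for url in urls:
--         lower = url.lower()
--         if any(fp in lower for fp in _FP_URL_SUBSTRINGS):
--             continue
--         result.add(url)
--     return result
-- ===== SOURCE B (Python) =====
-- _FP_URL_SUBSTRINGS = (
--     "tempuri.org",
--     "schemas.microsoft.com",
--     "schemas.xmlsoap.org",
--     "schemas.openxmlformats.org",
--     "schemas.datacontract.org",
--     "www.w3.org",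
--     "ns.adobe.com",
--     "purl.org",
--     "ocsp.digicert.com",
--     "crl.digicert.com",
--     "ocsp.verisign.com",
--     "crl.verisign.com",
--     "go.microsoft.com/fwlink",
-- )
--
--
-- def _has_fp(lower: str) -> bool:
--     # Single left-to-right scan of the string: at each position, check whether
--     # any false-positive substring starts there (what a literal-alternation
--     # regex engine would do), instead of one full 'in' scan per pattern.
--     for i in range(len(lower)):
--         for fp in _FP_URL_SUBSTRINGS:
--             if lower.startswith(fp, i):
--                 return True
--     return False
--
--
-- def _filter_url_fps(urls: set[str]) -> set[str]:
--     return {url for url in urls if not _has_fp(url.lower())}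
-- ===== Notes on version B (the rewrite author's own statement) =====
-- stated objective: alternative
-- what changed: Replaces the per-pattern 'fp in lower' membership scans with a single left-to-right scan of the lowered URL that checks at each position whether any false-positive substring starts there (a literal-alternation matcher), and builds the result as a set comprehension instead of a loop with continue.
import Mathlib
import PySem

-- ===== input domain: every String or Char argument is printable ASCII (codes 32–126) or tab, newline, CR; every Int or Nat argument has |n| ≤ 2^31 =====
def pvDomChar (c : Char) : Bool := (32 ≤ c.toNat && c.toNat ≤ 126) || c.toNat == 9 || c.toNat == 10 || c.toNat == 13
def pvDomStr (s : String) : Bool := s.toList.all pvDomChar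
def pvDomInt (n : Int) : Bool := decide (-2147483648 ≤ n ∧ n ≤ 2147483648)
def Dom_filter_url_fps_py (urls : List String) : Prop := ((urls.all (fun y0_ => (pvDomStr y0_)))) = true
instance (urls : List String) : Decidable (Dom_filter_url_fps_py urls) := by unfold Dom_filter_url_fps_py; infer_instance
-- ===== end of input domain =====

-- B replaces the per-pattern 'fp in lower' scans by one left-to-right scan of the
-- URL, checking at each position whether any false-positive substring starts there
-- (objective: alternative matching structure; same result, input/output are sets).

-- shared module-level constant _FP_URL_SUBSTRINGS
def fpSubstrings : List String :=
  [ "tempuri.org"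
  , "schemas.microsoft.com"
  , "schemas.xmlsoap.org"
  , "schemas.openxmlformats.org"
  , "schemas.datacontract.org"
  , "www.w3.org"
  , "ns.adobe.com"
  , "purl.org"
  , "ocsp.digicert.com"
  , "crl.digicert.com"
  , "ocsp.verisign.com"
  , "crl.verisign.com"
  , "go.microsoft.com/fwlink" ]

-- ===== PORT A =====
def filter_url_fps_py (urls : List String) : List String :=
  urls.foldl
    (fun result url =>
      let lower := PySem.Str.lower url
      if fpSubstrings.any (fun fp => PySem.Str.isIn fp lower) then result
      else PySem.Set.add result url)
    PySem.Set.empty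

-- ===== PORT B =====
-- _has_fp: 'for i in range(len(lower))' over positions = recursion over suffixes;
-- lower.startswith(fp, i) is PySem.Chars.startswith on the i-th suffix.
def hasFp : List Char → Bool
  | [] => false
  | c :: rest =>
      fpSubstrings.any (fun fp => PySem.Chars.startswith (c :: rest) fp.toList) || hasFp rest

def filter_url_fps_py_alt (urls : List String) : List String :=
  PySem.Set.ofList (urls.filter (fun url => !hasFp (PySem.Str.lower url).toList))

-- ===== PRECONDITION & SPEC =====
def Spec_filter_url_fps_py (urls : List String) (out : List String) : Prop := out = filter_url_fps_py_alt urls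
instance (urls : List String) (out : List String) : Decidable (Spec_filter_url_fps_py urls out) := by unfold Spec_filter_url_fps_py; infer_instance

-- ===== CLAIM (what is proved, stated in full; the proofs are below) =====
def Claim_equal_filter_url_fps_py : Prop := ∀ (urls : List String), Dom_filter_url_fps_py urls → Spec_filter_url_fps_py urls (filter_url_fps_py urls)

-- ===== LEMMAS AND PROOFS =====

-- B's position scan finds a hit iff some false-positive substring is an infix.
theorem hasFp_iff (cs : List Char) : hasFp cs = true ↔ ∃ fp ∈ fpSubstrings, fp.toList <:+: cs := by
  induction cs with
  | nil =>
      simp only [hasFp, List.infix_nil, Bool.false_eq_true, false_iff]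
      decide
  | cons c rest ih =>
      simp only [hasFp, Bool.or_eq_true, List.any_eq_true, ih,
        PySem.Chars.startswith_iff, List.infix_cons_iff]
      aesop

-- the two per-URL drop conditions agree
theorem cond_eq (u : String) :
    (fpSubstrings.any fun fp => PySem.Str.isIn fp (PySem.Str.lower u))
      = hasFp (PySem.Str.lower u).toList := by
  rw [Bool.eq_iff_iff]
  simp [List.any_eq_true, PySem.Chars.isIn_iff_infix, hasFp_iff]

-- A's skip-or-add fold is the fold of Set.add over the filtered list
theorem foldl_skip (p : String → Bool) (urls acc : List String) :
    urls.foldl (fun res u => if p u then res else PySem.Set.add res u) acc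
      = (urls.filter (fun u => !p u)).foldl PySem.Set.add acc := by
  induction urls generalizing acc with
  | nil => rfl
  | cons u rest ih =>
      by_cases h : p u = true <;> simp [h, ih]

-- ===== VERDICT (by name: the statement is the Claim_ definition above) =====
theorem filter_url_fps_py_spec : Claim_equal_filter_url_fps_py := by
  intro urls _
  show filter_url_fps_py urls = filter_url_fps_py_alt urls
  unfold filter_url_fps_py filter_url_fps_py_alt
  simp only [PySem.Set.ofList_eq_foldl]
  rw [foldl_skip]
  congr 1
  exact List.filter_congr (fun u _ => by rw [cond_eq])
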